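-- pv_equiv track=rewrite | github.com/zxxv1245/zxxv1245 | daily/20240309/2502.py | check
-- ===== SOURCE A (Python) =====
-- def check(D,K) :
--     for i in range(1,K-1) :
--         for j in range(i,K) :
--             if i == 2 and j == 25 :
--                 a = i
--             DP = [0]*(D+1)
--             DP[1] = i
--             DP[2] = j
--             for a in range(3,D+1) :
--                 DP[a] = DP[a-1]+DP[a-2]
--             if DP[D] == K :
--                 return i,j
-- ===== SOURCE B (Python) =====
-- def check(D, K):
--     # DP[D] is linear in the seeds: DP[D] = a*i + b*j with Fibonacci coefficients.
--     if K < 3: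
--         return None
--     a, b = 0, 1
--     for _ in range(D - 2):
--         a, b = b, a + b
--     for i in range(1, K - 1):
--         r = K - a * i
--         if r % b == 0:
--             j = r // b
--             if i <= j < K:
--                 return i, j
--     return None
-- ===== Notes on version B (the rewrite author's own statement) =====
-- stated objective: faster
-- what changed: B precomputes the Fibonacci coefficients (a,b) of DP[D]=a*i+b*j once, then solves for j directly per i, removing both the inner j-scan and the per-pair DP array.
import Mathlib
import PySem

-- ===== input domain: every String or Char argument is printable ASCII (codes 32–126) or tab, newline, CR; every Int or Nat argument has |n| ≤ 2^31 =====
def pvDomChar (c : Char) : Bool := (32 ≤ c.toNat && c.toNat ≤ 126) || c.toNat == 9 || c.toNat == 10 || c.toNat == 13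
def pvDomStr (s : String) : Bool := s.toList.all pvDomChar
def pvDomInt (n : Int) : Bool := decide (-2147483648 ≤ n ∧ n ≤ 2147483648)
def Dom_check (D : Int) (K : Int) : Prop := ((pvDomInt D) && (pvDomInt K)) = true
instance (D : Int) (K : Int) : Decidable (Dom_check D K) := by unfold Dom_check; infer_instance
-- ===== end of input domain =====

-- B replaces A's per-pair O(D) DP array and inner j-scan by Fibonacci coefficients computed once
-- and a direct solve for j (asymptotically faster).

-- ===== PORT A =====
-- DP value of the Python inner body: DP=[0]*(D+1); DP[1]=i; DP[2]=j; DP[a]=DP[a-1]+DP[a-2]; DP[D].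
-- The line 'if i == 2 and j == 25 : a = i' only binds a local that the following for-loop rebinds,
-- so it has no effect on the result and is omitted.
-- List indexing uses set/getD with .toNat: exact here because on Pre_check every index used
-- (1, 2, a-2..a for 3 ≤ a ≤ D, and D) is nonnegative and in range; outside Pre_check Python raises.
def checkDP (D i j : Int) : Int :=
  let dp := List.replicate (D + 1).toNat (0 : Int)
  let dp := dp.set 1 i
  let dp := dp.set 2 j
  let dp := (PySem.List.pyRange 3 (D + 1) 1).foldl
      (fun dp a => dp.set a.toNat (dp.getD (a - 1).toNat 0 + dp.getD (a - 2).toNat 0)) dp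
  dp.getD D.toNat 0

def check (D : Int) (K : Int) : Option (Int × Int) :=
  (PySem.List.pyRange 1 (K - 1) 1).findSome? fun i =>
    (PySem.List.pyRange i K 1).findSome? fun j =>
      if checkDP D i j = K then some (i, j) else none

-- ===== PORT B =====
def check_alt (D : Int) (K : Int) : Option (Int × Int) :=
  if K < 3 then none
  else
    let p := (PySem.List.pyRange 0 (D - 2) 1).foldl
        (fun (p : Int × Int) _ => (p.2, p.1 + p.2)) ((0 : Int), (1 : Int))
    (PySem.List.pyRange 1 (K - 1) 1).findSome? fun i =>
      let r := K - p.1 * i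
      if PySem.Int.mod r p.2 = 0 then
        let j := PySem.Int.floordiv r p.2
        if i ≤ j ∧ j < K then some (i, j) else none
      else none

-- ===== PRECONDITION & SPEC =====
-- Pre_check excludes exactly the inputs where Python A raises IndexError:
-- for K ≥ 3 the loop body runs and needs the DP list to have indices 1 and 2, i.e. D ≥ 2.
def Pre_check (D : Int) (K : Int) : Prop := K < 3 ∨ 2 ≤ D
instance (D : Int) (K : Int) : Decidable (Pre_check D K) := by unfold Pre_check; infer_instance
def pvWitness_check : Int × Int := (3, 10)

def Spec_check (D : Int) (K : Int) (out : Option (Int × Int)) : Prop := out = check_alt D K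
instance (D : Int) (K : Int) (out : Option (Int × Int)) : Decidable (Spec_check D K out) := by unfold Spec_check; infer_instance

-- ===== CLAIM (what is proved, stated in full; the proofs are below) =====
def Claim_equal_check : Prop := ∀ (D : Int) (K : Int), Dom_check D K → Pre_check D K → Spec_check D K (check D K)

-- ===== LEMMAS AND PROOFS =====

-- the linear recurrence A's DP realises
def fibLin (i j : Int) : Nat → Int
  | 0 => 0
  | 1 => i
  | 2 => j
  | (n + 3) => fibLin i j (n + 2) + fibLin i j (n + 1)

-- the coefficient step B iterates
def fibStep (p : Int × Int) : Int × Int := (p.2, p.1 + p.2)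

theorem foldl_const_iterate {α β : Type} (g : α → α) (init : α) (l : List β) :
    l.foldl (fun p _ => g p) init = g^[l.length] init := by
  induction l generalizing init with
  | nil => rfl
  | cons x xs ih => simp [List.foldl_cons, ih, Function.iterate_succ_apply]

theorem fibLin_eq_iterate (i j : Int) (n : Nat) :
    fibLin i j (n + 2) = (fibStep^[n] (0, 1)).1 * i + (fibStep^[n] (0, 1)).2 * j ∧
    fibLin i j (n + 3) = (fibStep^[n + 1] (0, 1)).1 * i + (fibStep^[n + 1] (0, 1)).2 * j := by
  induction n with
  | zero =>
    refine ⟨by simp [fibLin], ?_⟩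
    show j + i = _
    simp [fibStep]; ring
  | succ n ih =>
    refine ⟨ih.2, ?_⟩
    have h4 : fibLin i j (n + 1 + 3) = fibLin i j (n + 3) + fibLin i j (n + 2) := rfl
    have hs1 : fibStep^[n + 1] ((0 : Int), (1 : Int)) = fibStep (fibStep^[n] (0, 1)) :=
      Function.iterate_succ_apply' _ _ _
    have hs2 : fibStep^[n + 1 + 1] ((0 : Int), (1 : Int)) = fibStep (fibStep^[n + 1] (0, 1)) :=
      Function.iterate_succ_apply' _ _ _
    rw [h4, ih.1, ih.2, hs2, hs1]
    simp only [fibStep]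
    ring

theorem fibStep_pos (n : Nat) :
    0 ≤ (fibStep^[n] ((0 : Int), (1 : Int))).1 ∧ 1 ≤ (fibStep^[n] ((0 : Int), (1 : Int))).2 := by
  induction n with
  | zero => simp
  | succ n ih =>
    rw [Function.iterate_succ_apply']
    exact ⟨by simpa [fibStep] using le_trans zero_le_one ih.2, by simp [fibStep]; omega⟩

-- invariant of A's DP fold: after processing range(3, t+1) the list holds fibLin at every k ≤ t
theorem dp_fold_inv (i j : Int) (N : Nat) (hN : 2 ≤ N) : ∀ (t : Nat), 2 ≤ t → t ≤ N →
    ((PySem.List.pyRange 3 ((t : Int) + 1) 1).foldl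
        (fun dp a => dp.set a.toNat (dp.getD (a - 1).toNat 0 + dp.getD (a - 2).toNat 0))
        (((List.replicate (N + 1) (0 : Int)).set 1 i).set 2 j)).length = N + 1 ∧
    ∀ k : Nat, k ≤ t →
      ((PySem.List.pyRange 3 ((t : Int) + 1) 1).foldl
        (fun dp a => dp.set a.toNat (dp.getD (a - 1).toNat 0 + dp.getD (a - 2).toNat 0))
        (((List.replicate (N + 1) (0 : Int)).set 1 i).set 2 j)).getD k 0 = fibLin i j k := by
  intro t
  induction t with
  | zero => omega
  | succ t ih =>
    intro h2 hle
    by_cases ht : t = 1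
    · subst ht
      have hnil : PySem.List.pyRange 3 ((2 : Int) + 1) 1 = [] :=
        PySem.List.pyRange_one_eq_nil (by omega)
      rw [show ((1 + 1 : Nat) : Int) = (2 : Int) by norm_num, hnil]
      simp only [List.foldl_nil]
      constructor
      · simp
      · intro k hk
        have hlen1 : ((List.replicate (N + 1) (0 : Int)).set 1 i).length = N + 1 := by simp
        interval_cases k
        · rw [List.getD, List.getElem?_set_ne (by omega), List.getElem?_set_ne (by omega),
            List.getElem?_replicate, if_pos (by omega)]
          rfl
        · rw [List.getD, List.getElem?_set_ne (by omega),
            List.getElem?_set_self (by simp; omega)]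
          rfl
        · rw [List.getD, List.getElem?_set_self (by rw [hlen1]; omega)]
          rfl
    · have h2t : 2 ≤ t := by omega
      have htN : t ≤ N := by omega
      obtain ⟨ihlen, ihval⟩ := ih h2t htN
      have hsplit : PySem.List.pyRange 3 (((t + 1 : Nat) : Int) + 1) 1
          = PySem.List.pyRange 3 ((t : Int) + 1) 1 ++ [(t : Int) + 1] := by
        rw [show (((t + 1 : Nat) : Int) + 1) = ((t : Int) + 1) + 1 by push_cast; ring]
        exact PySem.List.pyRange_one_succ_right (by omega)
      rw [hsplit, List.foldl_append]
      set dpt := (PySem.List.pyRange 3 ((t : Int) + 1) 1).foldl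
        (fun dp a => dp.set a.toNat (dp.getD (a - 1).toNat 0 + dp.getD (a - 2).toNat 0))
        (((List.replicate (N + 1) (0 : Int)).set 1 i).set 2 j) with hdpt
      simp only [List.foldl_cons, List.foldl_nil]
      have e1 : ((t : Int) + 1).toNat = t + 1 := by omega
      have e2 : ((t : Int) + 1 - 1).toNat = t := by omega
      have e3 : ((t : Int) + 1 - 2).toNat = t - 1 := by omega
      rw [e1, e2, e3]
      have hlen : (dpt.set (t + 1) (dpt.getD t 0 + dpt.getD (t - 1) 0)).length = N + 1 := by
        simp [ihlen]
      refine ⟨hlen, ?_⟩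
      intro k hk
      have hval : dpt.getD t 0 + dpt.getD (t - 1) 0 = fibLin i j (t + 1) := by
        rw [ihval t (by omega), ihval (t - 1) (by omega)]
        obtain ⟨m, rfl⟩ : ∃ m, t = m + 2 := ⟨t - 2, by omega⟩
        show fibLin i j (m + 2) + fibLin i j (m + 1) = fibLin i j (m + 3)
        rfl
      by_cases hkt : k = t + 1
      · subst hkt
        rw [List.getD, List.getElem?_set_self (by omega), Option.getD_some, hval]
      · rw [List.getD, List.getElem?_set_ne (by omega), ← List.getD]
        exact ihval k (by omega)

theorem checkDP_eq (D i j : Int) (hD : 2 ≤ D) :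
    checkDP D i j = (fibStep^[(D - 2).toNat] (0, 1)).1 * i
      + (fibStep^[(D - 2).toNat] (0, 1)).2 * j := by
  obtain ⟨N, hN⟩ : ∃ N : Nat, D = (N : Int) ∧ 2 ≤ N := ⟨D.toNat, by omega, by omega⟩
  obtain ⟨hD', hN2⟩ := hN
  subst hD'
  have h1 : ((N : Int) + 1).toNat = N + 1 := by omega
  have h2 : (N : Int).toNat = N := by omega
  obtain ⟨hlen, hval⟩ := dp_fold_inv i j N hN2 N hN2 le_rfl
  have : checkDP (N : Int) i j = fibLin i j N := by
    unfold checkDP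
    rw [h1, h2]
    exact hval N le_rfl
  rw [this]
  obtain ⟨m, rfl⟩ : ∃ m, N = m + 2 := ⟨N - 2, by omega⟩
  have : (((m + 2 : Nat) : Int) - 2).toNat = m := by omega
  rw [this]
  exact (fibLin_eq_iterate i j m).1

theorem findSome?_ite_eq {α : Type} [DecidableEq α] {β : Type} (l : List α) (j0 : α) (v : β) :
    (l.findSome? fun j => if j = j0 then some v else none)
      = if j0 ∈ l then some v else none := by
  induction l with
  | nil => simp
  | cons x xs ih =>
    by_cases hx : x = j0
    · subst hx; simp
    · simp [hx, ih, Ne.symm hx]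

-- the inner j-scan of A equals B's direct solve, for any coefficients a, 0 < b
theorem inner_eq (a b i K : Int) (hb : 0 < b) :
    ((PySem.List.pyRange i K 1).findSome? fun j =>
        if a * i + b * j = K then some (i, j) else none)
      = (if PySem.Int.mod (K - a * i) b = 0 then
          (if i ≤ PySem.Int.floordiv (K - a * i) b ∧ PySem.Int.floordiv (K - a * i) b < K
            then some (i, PySem.Int.floordiv (K - a * i) b) else none)
         else none) := by
  set r := K - a * i with hr
  by_cases hdvd : PySem.Int.mod r b = 0
  · have hbdvd : b ∣ r := (PySem.Int.mod_eq_zero_iff_dvd r b).mp hdvd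
    set j0 := PySem.Int.floordiv r b with hj0
    have hj0r : b * j0 = r := by
      have h := PySem.Int.floordiv_mul_add_mod r b
      rw [hdvd, add_zero] at h
      rw [hj0, mul_comm]; exact h
    have hpt : ∀ j : Int, (if a * i + b * j = K then some (i, j) else none)
        = (if j = j0 then some (i, j0) else none) := by
      intro j
      by_cases hj : j = j0
      · subst hj; simp; omega
      · have : a * i + b * j ≠ K := by
          intro hK
          have : b * j = b * j0 := by omega
          exact hj (by exact mul_left_cancel₀ (by omega) this)
        simp [this, hj]
    simp only [hpt]
    rw [findSome?_ite_eq, if_pos hdvd]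
    simp [PySem.List.mem_pyRange_one]
  · rw [if_neg hdvd]
    rw [List.findSome?_eq_none_iff]
    intro j _
    have : a * i + b * j ≠ K := by
      intro hK
      have : b ∣ r := ⟨j, by omega⟩
      exact hdvd ((PySem.Int.mod_eq_zero_iff_dvd r b).mpr this)
    simp [this]

-- ===== VERDICT (by name: the statement is the Claim_ definition above) =====
theorem check_spec : Claim_equal_check := by
  intro D K _ hpre
  unfold Spec_check check check_alt
  by_cases hK : K < 3
  · rw [if_pos hK, PySem.List.pyRange_one_eq_nil (by omega)]
    rfl
  · have hD : 2 ≤ D := by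
      rcases hpre with h | h
      · exact absurd h hK
      · exact h
    rw [if_neg hK]
    have hfold : (PySem.List.pyRange 0 (D - 2) 1).foldl
        (fun (p : Int × Int) _ => (p.2, p.1 + p.2)) ((0 : Int), (1 : Int))
        = fibStep^[(D - 2).toNat] (0, 1) := by
      rw [show (fun (p : Int × Int) (_ : Int) => (p.2, p.1 + p.2))
            = (fun (p : Int × Int) (_ : Int) => fibStep p) from rfl,
        foldl_const_iterate, PySem.List.length_pyRange_one]
      simp
    simp only [hfold]
    set n := (D - 2).toNat with hn
    have hstep := fibStep_pos n
    congr 1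
    funext i
    rw [← inner_eq (fibStep^[n] (0, 1)).1 (fibStep^[n] (0, 1)).2 i K (by omega)]
    congr 1
    funext j
    rw [checkDP_eq D i j hD, hn]
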